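-- pv_equiv track=rewrite | github.com/AndrewS-hash/pyFiddle | pyFiddle_Intermediate.py | check_min_heap
-- ===== SOURCE A (Python) =====
-- def check_min_heap(arr):
--     """
--     Check if the given array represents a min heap.
--
--     Args:
--         arr (list): The array representation of a binary tree.
--
--     Returns:
--         bool: True if the array represents a min heap, False otherwise.
--     """
--     n = len(arr)
--
--     # Check each node except the leaves (since leaves don't have children)
--     for i in range((n // 2) - 1, -1, -1):
--         left_child_index = 2 * i + 1
--         right_child_index = 2 * i + 2
--
--         # Check if left child exists and if it violates the heap property
--         if left_child_index < n and arr[i] > arr[left_child_index]: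
--             return False
--
--         # Check if right child exists and if it violates the heap property
--         if right_child_index < n and arr[i] > arr[right_child_index]:
--             return False
--
--     return True
-- ===== SOURCE B (Python) =====
-- def check_min_heap(arr):
--     """
--     Check if the given array represents a min heap.
--
--     Re-implementation: no index arithmetic at all.  The sequence of parents of
--     arr[1], arr[2], ... is exactly each element of arr repeated twice, so build
--     that doubled stream and zip it against the children arr[1:].
--     """
--     parents = [x for x in arr for _ in range(2)]
--     return all(p <= c for p, c in zip(parents, arr[1:]))
-- ===== Notes on version B (the rewrite author's own statement) =====
-- stated objective: alternative
-- what changed: B uses no index arithmetic: it materialises the parent stream by repeating every element twice ([x for x in arr for _ in range(2)]) and zips it against the children arr[1:], checking p <= c pairwise, instead of A's descending loop over parent indices with explicit 2*i+1 / 2*i+2 child lookups.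
import Mathlib
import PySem

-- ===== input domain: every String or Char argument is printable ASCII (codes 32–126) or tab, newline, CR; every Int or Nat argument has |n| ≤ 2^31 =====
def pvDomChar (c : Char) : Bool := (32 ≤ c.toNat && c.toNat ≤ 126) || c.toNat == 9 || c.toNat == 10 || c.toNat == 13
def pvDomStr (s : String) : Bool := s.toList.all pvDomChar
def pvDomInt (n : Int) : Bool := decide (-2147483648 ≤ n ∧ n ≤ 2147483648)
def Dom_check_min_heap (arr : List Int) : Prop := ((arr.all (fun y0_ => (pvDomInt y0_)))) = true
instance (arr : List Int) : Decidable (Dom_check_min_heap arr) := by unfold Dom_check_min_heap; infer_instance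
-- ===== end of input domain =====

-- B builds the parent stream (each element repeated twice) and zips it against the
-- children arr[1:], with no index arithmetic; same O(n) cost, a different formulation.


-- ===== PORT A =====
-- A's loop `for i in range(n//2 - 1, -1, -1)` with its two early returns;
-- every index accessed is provably in range, so arr[i] is pyGetD with an unused default.
def check_min_heap_loopA (arr : List Int) : List Int → Bool
  | [] => true
  | i :: rest =>
    let n : Int := PySem.List.len arr
    let l := 2 * i + 1
    let r := 2 * i + 2
    if l < n ∧ PySem.List.pyGetD arr i 0 > PySem.List.pyGetD arr l 0 then false
    else if r < n ∧ PySem.List.pyGetD arr i 0 > PySem.List.pyGetD arr r 0 then false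
    else check_min_heap_loopA arr rest

def check_min_heap (arr : List Int) : Bool :=
  check_min_heap_loopA arr
    (PySem.List.pyRange (PySem.Int.floordiv (PySem.List.len arr) 2 - 1) (-1) (-1))

-- ===== PORT B =====
-- `parents = [x for x in arr for _ in range(2)]` then
-- `all(p <= c for p, c in zip(parents, arr[1:]))`.
def check_min_heap_alt (arr : List Int) : Bool :=
  let parents := arr.flatMap (fun x => [x, x])
  (parents.zip (PySem.List.slice arr (some 1) none)).all (fun pc => decide (pc.1 ≤ pc.2))

-- ===== PRECONDITION & SPEC =====
def Spec_check_min_heap (arr : List Int) (out : Bool) : Prop := out = check_min_heap_alt arr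
instance (arr : List Int) (out : Bool) : Decidable (Spec_check_min_heap arr out) := by unfold Spec_check_min_heap; infer_instance

-- ===== CLAIM (what is proved, stated in full; the proofs are below) =====
def Claim_equal_check_min_heap : Prop := ∀ (arr : List Int), Dom_check_min_heap arr → Spec_check_min_heap arr (check_min_heap arr)

-- ===== LEMMAS AND PROOFS =====

-- the common characterisation: every non-root node is ≥ its parent (Nat-indexed)
def HeapProp (arr : List Int) : Prop :=
  ∀ k : Nat, (h : k + 1 < arr.length) → arr[k / 2]'(by omega) ≤ arr[k + 1]

-- A's early-return loop is List.all of its body predicate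
theorem loopA_eq_all (arr : List Int) (is : List Int) :
    check_min_heap_loopA arr is =
      is.all (fun i =>
        !(decide ((2 * i + 1 < PySem.List.len arr ∧
            PySem.List.pyGetD arr i 0 > PySem.List.pyGetD arr (2 * i + 1) 0) ∨
          (2 * i + 2 < PySem.List.len arr ∧
            PySem.List.pyGetD arr i 0 > PySem.List.pyGetD arr (2 * i + 2) 0)))) := by
  induction is with
  | nil => rfl
  | cons i rest ih =>
    simp only [check_min_heap_loopA, List.all_cons, ih]
    split_ifs with h1 h2 <;> simp_all
    exact fun _ => ⟨by omega, by omega⟩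

-- the parent-side checks of A amount to the child-side condition (Int-indexed)
theorem checks_iff (arr : List Int) :
    (∀ i, 0 ≤ i → i ≤ PySem.Int.floordiv (PySem.List.len arr) 2 - 1 →
      ((2 * i + 1 < PySem.List.len arr →
          PySem.List.pyGetD arr i 0 ≤ PySem.List.pyGetD arr (2 * i + 1) 0) ∧
       (2 * i + 2 < PySem.List.len arr →
          PySem.List.pyGetD arr i 0 ≤ PySem.List.pyGetD arr (2 * i + 2) 0))) ↔
    (∀ j, 1 ≤ j → j < PySem.List.len arr →
      PySem.List.pyGetD arr (PySem.Int.floordiv (j - 1) 2) 0 ≤ PySem.List.pyGetD arr j 0) := by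
  have hlen : (0:Int) ≤ PySem.List.len arr := by
    simp [PySem.List.len_eq]
  set n := PySem.List.len arr with hn
  have hdivn : PySem.Int.floordiv n 2 = n / 2 :=
    PySem.Int.floordiv_eq_ediv_of_pos (by omega)
  constructor
  · intro h j hj1 hjn
    have hdiv : PySem.Int.floordiv (j - 1) 2 = (j - 1) / 2 :=
      PySem.Int.floordiv_eq_ediv_of_pos (by omega)
    rw [hdiv]
    set i := (j - 1) / 2 with hi
    have hji : j = 2 * i + 1 ∨ j = 2 * i + 2 := by omega
    have hrange : 0 ≤ i ∧ i ≤ PySem.Int.floordiv n 2 - 1 := by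
      rw [hdivn]; omega
    rcases hji with hj | hj
    · have := (h i hrange.1 hrange.2).1 (by omega)
      rwa [← hj] at this
    · have := (h i hrange.1 hrange.2).2 (by omega)
      rwa [← hj] at this
  · intro h i hi0 hiub
    constructor
    · intro hl
      have hdiv : PySem.Int.floordiv (2 * i + 1 - 1) 2 = i := by
        rw [PySem.Int.floordiv_eq_ediv_of_pos (by omega)]; omega
      have := h (2 * i + 1) (by omega) hl
      rwa [hdiv] at this
    · intro hr
      have hdiv : PySem.Int.floordiv (2 * i + 2 - 1) 2 = i := by
        rw [PySem.Int.floordiv_eq_ediv_of_pos (by omega)]; omega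
      have := h (2 * i + 2) (by omega) hr
      rwa [hdiv] at this

-- A = true ↔ HeapProp
theorem a_iff (arr : List Int) : check_min_heap arr = true ↔ HeapProp arr := by
  unfold check_min_heap
  rw [loopA_eq_all]
  simp only [List.all_eq_true, PySem.List.mem_pyRange_neg_one,
    Bool.not_eq_eq_eq_not, Bool.not_true, decide_eq_false_iff_not, not_or, not_and, not_lt]
  have hget : ∀ (m : Nat) (hm : m < arr.length),
      PySem.List.pyGetD arr ((m : Nat) : Int) 0 = arr[m]'hm := by
    intro m hm
    rw [PySem.List.pyGetD_eq_getElem arr 0 (by positivity) (by exact_mod_cast hm)]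
    simp
  constructor
  · intro h
    have h' := (checks_iff arr).mp (by
      intro i hi0 hiub
      have := h i ⟨by omega, hiub⟩
      exact ⟨fun hl => this.1 hl, fun hr => this.2 hr⟩)
    intro k hk
    have hj := h' ((k : Int) + 1) (by omega) (by simp [PySem.List.len_eq]; omega)
    have hdiv : PySem.Int.floordiv ((k : Int) + 1 - 1) 2 = ((k / 2 : Nat) : Int) := by
      rw [PySem.Int.floordiv_eq_ediv_of_pos (by omega)]
      omega
    have hcast : ((k : Int) + 1) = (((k + 1 : Nat)) : Int) := by push_cast; ring
    rw [hdiv, hcast, hget _ (by omega), hget _ hk] at hj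
    exact hj
  · intro h
    have h' := (checks_iff arr).mpr (by
      intro j hj1 hjn
      have hjn' : j.toNat < arr.length := by
        simp [PySem.List.len_eq] at hjn; omega
      have hk : (j.toNat - 1) + 1 < arr.length := by omega
      have hkey := h (j.toNat - 1) hk
      have hidx : j.toNat - 1 + 1 = j.toNat := by omega
      simp only [hidx] at hkey
      have hdiv : PySem.Int.floordiv (j - 1) 2 = (((j.toNat - 1) / 2 : Nat) : Int) := by
        rw [PySem.Int.floordiv_eq_ediv_of_pos (by omega)]
        omega
      have hr : PySem.List.pyGetD arr j 0 = arr[j.toNat]'hjn' := by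
        rw [PySem.List.pyGetD_eq_getElem arr 0 (by omega)
          (by simpa [PySem.List.len_eq] using hjn)]
      rw [hdiv, hget _ (by omega), hr]
      exact hkey)
    intro i hi
    exact h' i (by omega) hi.2

-- the doubled parent stream
theorem flat2_length (arr : List Int) :
    (arr.flatMap (fun x => [x, x])).length = 2 * arr.length := by
  induction arr with
  | nil => rfl
  | cons x xs ih => simp [List.flatMap_cons, ih]; omega

theorem flat2_getElem? (arr : List Int) (k : Nat) :
    (arr.flatMap (fun x => [x, x]))[k]? = arr[k / 2]? := by
  induction arr generalizing k with
  | nil => simp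
  | cons x xs ih =>
    match k with
    | 0 => simp
    | 1 => simp
    | (m + 2) =>
      have : (m + 2) / 2 = m / 2 + 1 := by omega
      simp [List.flatMap_cons, this, ih m]

theorem flat2_getElem (arr : List Int) (k : Nat) (hk : k < (arr.flatMap (fun x => [x, x])).length)
    (hk2 : k / 2 < arr.length) :
    (arr.flatMap (fun x => [x, x]))[k]'hk = arr[k / 2]'hk2 := by
  have h := flat2_getElem? arr k
  rw [List.getElem?_eq_getElem hk, List.getElem?_eq_getElem hk2] at h
  exact Option.some.inj h

-- B = true ↔ HeapProp
theorem b_iff (arr : List Int) : check_min_heap_alt arr = true ↔ HeapProp arr := by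
  unfold check_min_heap_alt
  rw [PySem.List.slice_from_one, List.all_eq_true]
  constructor
  · intro h k hk
    have hlen : k < ((arr.flatMap fun x => [x, x]).zip arr.tail).length := by
      rw [List.length_zip, flat2_length, List.length_tail]; omega
    have hthis := h _ (List.getElem_mem hlen)
    rw [List.getElem_zip] at hthis
    simp only [decide_eq_true_eq] at hthis
    rwa [flat2_getElem arr k _ (by omega), List.getElem_tail] at hthis
  · intro h pc hpc
    rw [List.mem_iff_getElem] at hpc
    obtain ⟨k, hlen, rfl⟩ := hpc
    have hk1 : k + 1 < arr.length := by
      rw [List.length_zip, flat2_length, List.length_tail] at hlen; omega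
    rw [List.getElem_zip]
    simp only [decide_eq_true_eq]
    rw [flat2_getElem arr k _ (by omega), List.getElem_tail]
    exact h k hk1

-- ===== VERDICT (by name: the statement is the Claim_ definition above) =====
theorem check_min_heap_spec : Claim_equal_check_min_heap := by
  intro arr _
  unfold Spec_check_min_heap
  rw [Bool.eq_iff_iff, a_iff, b_iff]
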